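-- pv_equiv track=rewrite | github.com/nimble/FAANG | Leetcode/2108-FindFirstPalindromicStringintheArray.py | firstPalindrome
-- ===== SOURCE A (Python) =====
-- from typing import List
--
-- def firstPalindrome(words: List[str]) -> str:
--     # Define our isPalindrome Fuction.
--     def ispal(w):
--         left, right = 0, len(w) - 1
--         while left <= right:
--             if(w[left] != w[right]):
--                 return False
--             right-=1
--             left+=1
--         return True
--
--     for word in words:
--         if ispal(word):
--             return word
--     return ""
-- ===== SOURCE B (Python) =====
-- def firstPalindrome(words):
--     return next((w for w in words if w == w[::-1]), "")
-- ===== Notes on version B (the rewrite author's own statement) =====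
-- stated objective: idiomatic
-- what changed: Replaces the explicit two-pointer inward-walking ispal helper and index loop with a single generator expression that materializes each word's reversed slice and compares it, taking the first match via next(..., '').
import Mathlib
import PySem

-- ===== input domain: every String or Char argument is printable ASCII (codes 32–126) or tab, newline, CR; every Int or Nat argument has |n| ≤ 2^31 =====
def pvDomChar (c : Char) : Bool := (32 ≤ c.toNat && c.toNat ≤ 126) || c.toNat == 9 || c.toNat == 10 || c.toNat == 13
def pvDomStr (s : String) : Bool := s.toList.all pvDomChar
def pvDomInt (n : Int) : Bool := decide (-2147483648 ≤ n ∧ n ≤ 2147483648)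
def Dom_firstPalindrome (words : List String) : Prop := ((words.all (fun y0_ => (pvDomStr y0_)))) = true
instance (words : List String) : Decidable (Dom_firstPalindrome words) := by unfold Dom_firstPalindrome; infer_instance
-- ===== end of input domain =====

-- B replaces A's two-pointer ispal helper by the idiomatic reverse-slice comparison w == w[::-1].

-- ===== PORT A =====
-- the while loop of ispal: left/right walk inward, short-circuiting on a mismatch
def ispalLoop (w : List Char) (left right : Int) : Bool :=
  if left ≤ right then
    if PySem.List.pyGet? w left ≠ PySem.List.pyGet? w right then false
    else ispalLoop w (left + 1) (right - 1)
  else true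
termination_by (right + 1 - left).toNat
decreasing_by omega

def ispal (w : String) : Bool := ispalLoop w.toList 0 (PySem.Str.len w - 1)

def firstPalindrome (words : List String) : String :=
  match words with
  | [] => ""
  | word :: rest => if ispal word then word else firstPalindrome rest

-- ===== PORT B =====
def firstPalindrome_alt (words : List String) : String :=
  match words.find? (fun w => some w == PySem.Str.slice? w none none (-1)) with
  | some w => w
  | none => ""

-- ===== PRECONDITION & SPEC =====
def Spec_firstPalindrome (words : List String) (out : String) : Prop := out = firstPalindrome_alt words
instance (words : List String) (out : String) : Decidable (Spec_firstPalindrome words out) := by unfold Spec_firstPalindrome; infer_instance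

-- ===== CLAIM (what is proved, stated in full; the proofs are below) =====
def Claim_equal_firstPalindrome : Prop := ∀ (words : List String), Dom_firstPalindrome words → Spec_firstPalindrome words (firstPalindrome words)

-- ===== LEMMAS AND PROOFS =====

-- A's inward loop checks exactly the mirrored pairs in the window [l, r] (l + r is invariant).
theorem ispalLoop_iff (cs : List Char) :
    ∀ (n : Nat) (l r : Int), (r + 1 - l).toNat ≤ n →
      (ispalLoop cs l r = true ↔
        ∀ i : Int, l ≤ i → i ≤ r → PySem.List.pyGet? cs i = PySem.List.pyGet? cs (l + r - i)) := by
  intro n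
  induction n with
  | zero =>
    intro l r hn
    have hlr : r < l := by omega
    rw [ispalLoop]
    simp only [if_neg (by omega : ¬ l ≤ r)]
    constructor
    · intro _ i hi hi'; omega
    · intro _; trivial
  | succ n ih =>
    intro l r hn
    rw [ispalLoop]
    by_cases hlr : l ≤ r
    case neg =>
      simp only [if_neg hlr]
      constructor
      · intro _ i hi hi'; omega
      · intro _; trivial
    simp only [if_pos hlr]
    by_cases hne : PySem.List.pyGet? cs l = PySem.List.pyGet? cs r
    · have hih := ih (l + 1) (r - 1) (by omega)
      rw [if_neg (not_not_intro hne), hih]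
      constructor
      · intro h i hi hi'
        rcases eq_or_lt_of_le hi with h1 | h1
        · have he : l + r - i = r := by omega
          rw [he, ← h1]; exact hne
        rcases eq_or_lt_of_le hi' with h2 | h2
        · have he : l + r - i = l := by omega
          rw [he, h2]; exact hne.symm
        · have := h i (by omega) (by omega)
          rw [this]; congr 1; omega
      · intro h i hi hi'
        have := h i (by omega) (by omega)
        rw [this]; congr 1; omega
    · simp only [ne_eq, hne, not_false_eq_true, if_true]
      constructor
      · intro h; cases h
      · intro h
        exact absurd (h l le_rfl hlr) (by simpa using hne)

-- the two palindrome tests agree on every string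
theorem ispal_eq_rev (w : String) : ispal w = true ↔ w.toList.reverse = w.toList := by
  set cs := w.toList with hcs
  have hlen : PySem.Str.len w = (cs.length : Int) := by
    simp [PySem.Str.len, hcs]
  unfold ispal
  rw [hlen, ispalLoop_iff cs ((cs.length : Int) - 1 + 1 - 0).toNat 0 ((cs.length : Int) - 1) le_rfl]
  constructor
  · intro h
    apply List.ext_getElem?
    intro i
    by_cases hi : i < cs.length
    · rw [List.getElem?_reverse hi]
      have h1 := h (i : Int) (by omega) (by omega)
      have e1 : PySem.List.pyGet? cs (i : Int) = cs[i]? := by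
        simp [PySem.List.pyGet?_natCast]
      have e2 : (0 : Int) + ((cs.length : Int) - 1) - (i : Int) = ((cs.length - 1 - i : Nat) : Int) := by
        omega
      rw [e1, e2, PySem.List.pyGet?_natCast] at h1
      exact h1.symm
    · rw [List.getElem?_eq_none (by simpa using hi), List.getElem?_eq_none (by omega)]
  · intro h i hi hi'
    have hip : i.toNat < cs.length := by omega
    have e1 : PySem.List.pyGet? cs i = cs[i.toNat]? := PySem.List.pyGet?_of_nonneg cs hi
    have e2 : (0 : Int) + ((cs.length : Int) - 1) - i = ((cs.length - 1 - i.toNat : Nat) : Int) := by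
      omega
    rw [e1, e2, PySem.List.pyGet?_natCast]
    have := List.getElem?_reverse (l := cs) (by omega : cs.length - 1 - i.toNat < cs.length)
    have hrev : cs[cs.length - 1 - i.toNat]? = cs.reverse[cs.length - 1 - i.toNat]? := by
      rw [h]
    rw [hrev, this]
    congr 1
    omega

-- B's per-word predicate coincides with A's ispal
theorem pred_eq (w : String) :
    (some w == PySem.Str.slice? w none none (-1)) = ispal w := by
  rw [PySem.Str.slice?_none_none_neg_one]
  by_cases h : w.toList.reverse = w.toList
  · have h2 : ispal w = true := (ispal_eq_rev w).mpr h
    rw [h2]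
    simp only [Option.some.injEq, beq_iff_eq]
    rw [h, String.ofList_toList]
  · have h2 : ispal w = false := by
      cases hb : ispal w
      · rfl
      · exact absurd ((ispal_eq_rev w).mp hb) h
    rw [h2]
    simp only [beq_eq_false_iff_ne, ne_eq, Option.some.injEq]
    intro he
    apply h
    have := congrArg String.toList he
    simpa using this.symm

-- ===== VERDICT (by name: the statement is the Claim_ definition above) =====
theorem fp_eq (words : List String) : firstPalindrome words = firstPalindrome_alt words := by
  induction words with
  | nil => rfl
  | cons w ws ih =>
    unfold firstPalindrome firstPalindrome_alt
    rw [List.find?_cons, pred_eq]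
    cases h : ispal w
    · simpa [firstPalindrome_alt] using ih
    · rfl

theorem firstPalindrome_spec : Claim_equal_firstPalindrome := by
  intro words _
  exact fp_eq words
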